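-- pv_equiv track=rewrite | github.com/JCP1014/Lane-Merging | Python/three_to_two/window_based.py | schedule_single_lane
-- ===== SOURCE A (Python) =====
-- def schedule_single_lane(lane, traffic, W_same, W_diff, prev):
--     prevLane = prev[0]
--     prevTime = prev[2]
--     last = ('', 0, 0)
--     if prevLane == '':
--         last = (lane, 1, traffic[1])
--     elif lane == prevLane:
--         last = (lane, 1, max(traffic[1], prevTime+W_same))
--     else:
--         last = (lane, 1, max(traffic[1], prevTime+W_diff))
--     for i in range(2, len(traffic)):
--         prevTime = last[2]
--         last = (lane, i, max(traffic[i], prevTime+W_same))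
--     return last
-- ===== SOURCE B (Python) =====
-- def schedule_single_lane(lane, traffic, W_same, W_diff, prev):
--     n = len(traffic)
--     if prev[0] == '':
--         f1 = traffic[1]
--     elif lane == prev[0]:
--         f1 = max(traffic[1], prev[2] + W_same)
--     else:
--         f1 = max(traffic[1], prev[2] + W_diff)
--     final = max([f1 + (n - 2) * W_same]
--                 + [traffic[j] + (n - 1 - j) * W_same for j in range(2, n)])
--     return (lane, n - 1, final)
-- ===== Notes on version B (the rewrite author's own statement) =====
-- stated objective: alternative
-- what changed: replaces the sequential running-maximum loop by a closed-form maximum over index-offset terms traffic[j] + (n-1-j)*W_same, computing the final time in one max over a comprehension instead of threading state through the loop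
import Mathlib
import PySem

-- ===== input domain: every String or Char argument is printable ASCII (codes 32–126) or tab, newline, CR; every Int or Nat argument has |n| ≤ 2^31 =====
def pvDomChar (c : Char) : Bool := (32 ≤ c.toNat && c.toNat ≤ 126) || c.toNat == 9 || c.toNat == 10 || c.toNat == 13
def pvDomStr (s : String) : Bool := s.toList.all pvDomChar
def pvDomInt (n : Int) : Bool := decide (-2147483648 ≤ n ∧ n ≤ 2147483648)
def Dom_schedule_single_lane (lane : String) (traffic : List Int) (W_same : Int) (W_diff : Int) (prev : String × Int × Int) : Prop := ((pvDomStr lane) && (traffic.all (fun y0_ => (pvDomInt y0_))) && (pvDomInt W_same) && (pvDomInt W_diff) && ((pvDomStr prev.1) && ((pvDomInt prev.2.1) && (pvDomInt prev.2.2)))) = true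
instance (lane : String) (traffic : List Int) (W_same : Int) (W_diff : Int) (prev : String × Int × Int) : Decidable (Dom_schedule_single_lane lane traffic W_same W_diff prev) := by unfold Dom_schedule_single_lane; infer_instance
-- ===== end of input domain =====

-- B replaces A's sequential running-maximum loop by one closed-form maximum over
-- index-offset terms traffic[j] + (n-1-j)*W_same (objective: alternative, same cost).

-- ===== PORT A =====
def schedule_single_lane (lane : String) (traffic : List Int) (W_same : Int) (W_diff : Int) (prev : String × Int × Int) : String × Int × Int :=
  let prevLane := prev.1
  let prevTime := prev.2.2
  let last : String × Int × Int :=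
    if prevLane = "" then (lane, 1, PySem.List.pyGetD traffic 1 0)
    else if lane = prevLane then (lane, 1, max (PySem.List.pyGetD traffic 1 0) (prevTime + W_same))
    else (lane, 1, max (PySem.List.pyGetD traffic 1 0) (prevTime + W_diff))
  (PySem.List.pyRange 2 (traffic.length : Int) 1).foldl
    (fun last i =>
      let prevTime := last.2.2
      (lane, i, max (PySem.List.pyGetD traffic i 0) (prevTime + W_same)))
    last

-- ===== PORT B =====
def schedule_single_lane_alt (lane : String) (traffic : List Int) (W_same : Int) (W_diff : Int) (prev : String × Int × Int) : String × Int × Int :=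
  let n : Int := (traffic.length : Int)
  let f1 : Int :=
    if prev.1 = "" then PySem.List.pyGetD traffic 1 0
    else if lane = prev.1 then max (PySem.List.pyGetD traffic 1 0) (prev.2.2 + W_same)
    else max (PySem.List.pyGetD traffic 1 0) (prev.2.2 + W_diff)
  let final : Int :=
    ((PySem.List.pyRange 2 n 1).map
        (fun j => PySem.List.pyGetD traffic j 0 + (n - 1 - j) * W_same)).foldl
      max (f1 + (n - 2) * W_same)
  (lane, n - 1, final)

-- ===== PRECONDITION & SPEC =====
-- Pre_ excludes traffic lists with fewer than 2 elements, on which A raises IndexError at traffic[1].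
def Pre_schedule_single_lane (lane : String) (traffic : List Int) (W_same : Int) (W_diff : Int) (prev : String × Int × Int) : Prop :=
  2 ≤ traffic.length
instance (lane : String) (traffic : List Int) (W_same : Int) (W_diff : Int) (prev : String × Int × Int) : Decidable (Pre_schedule_single_lane lane traffic W_same W_diff prev) := by unfold Pre_schedule_single_lane; infer_instance

def pvWitness_schedule_single_lane : String × List Int × Int × Int × (String × Int × Int) :=
  ("A", [3, 5, 4], 1, 2, ("B", 0, 6))

def Spec_schedule_single_lane (lane : String) (traffic : List Int) (W_same : Int) (W_diff : Int) (prev : String × Int × Int) (out : String × Int × Int) : Prop := out = schedule_single_lane_alt lane traffic W_same W_diff prev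
instance (lane : String) (traffic : List Int) (W_same : Int) (W_diff : Int) (prev : String × Int × Int) (out : String × Int × Int) : Decidable (Spec_schedule_single_lane lane traffic W_same W_diff prev out) := by unfold Spec_schedule_single_lane; infer_instance

-- ===== CLAIM (what is proved, stated in full; the proofs are below) =====
def Claim_equal_schedule_single_lane : Prop := ∀ (lane : String) (traffic : List Int) (W_same : Int) (W_diff : Int) (prev : String × Int × Int), Dom_schedule_single_lane lane traffic W_same W_diff prev → Pre_schedule_single_lane lane traffic W_same W_diff prev → Spec_schedule_single_lane lane traffic W_same W_diff prev (schedule_single_lane lane traffic W_same W_diff prev)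

-- ===== LEMMAS AND PROOFS =====

theorem pv_foldl_max_add (l : List Int) (c w : Int) :
    List.foldl max (c + w) (l.map (fun x => x + w)) = List.foldl max c l + w := by
  induction l generalizing c with
  | nil => simp
  | cons x xs ih =>
    simp only [List.map_cons, List.foldl_cons]
    rw [max_add_add_right, ih]

theorem pv_core (lane : String) (traffic : List Int) (W : Int) :
    ∀ (k : Nat) (a : Int) (v : String × Int × Int), v.1 = lane → v.2.1 = a - 1 →
    List.foldl (fun last i => (lane, i, max (PySem.List.pyGetD traffic i 0) (last.2.2 + W)))
      v (PySem.List.pyRange a (a + k) 1)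
    = (lane, a + k - 1,
       List.foldl max (v.2.2 + k * W)
         ((PySem.List.pyRange a (a + k) 1).map
           (fun j => PySem.List.pyGetD traffic j 0 + (a + k - 1 - j) * W))) := by
  intro k
  induction k with
  | zero =>
    intro a v h1 h2
    obtain ⟨v1, v2, v3⟩ := v
    simp only [PySem.List.pyRange_one_eq_nil (by simp : a + (0 : Nat) ≤ a),
      List.map_nil, List.foldl_nil]
    simp at h1 h2
    simp [h1, h2]
  | succ k ih =>
    intro a v h1 h2
    have hsplit : PySem.List.pyRange a (a + ((k + 1 : Nat) : Int)) 1
        = PySem.List.pyRange a (a + k) 1 ++ [a + k] := by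
      have h := PySem.List.pyRange_one_succ_right (show a ≤ a + (k:Int) by omega)
      have he : a + ((k + 1 : Nat) : Int) = (a + k) + 1 := by push_cast; ring
      rw [he, h]
    rw [hsplit, List.foldl_append, ih a v h1 h2, List.map_append, List.foldl_append]
    simp only [List.foldl_cons, List.foldl_nil, List.map_cons, List.map_nil]
    have hmap : (PySem.List.pyRange a (a + k) 1).map
        (fun j => PySem.List.pyGetD traffic j 0 + (a + ((k + 1 : Nat) : Int) - 1 - j) * W)
        = ((PySem.List.pyRange a (a + k) 1).map
            (fun j => PySem.List.pyGetD traffic j 0 + (a + k - 1 - j) * W)).map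
            (fun x => x + W) := by
      rw [List.map_map]
      apply List.map_congr_left
      intro j _
      simp only [Function.comp]
      push_cast
      ring
    have hc : v.2.2 + ((k + 1 : Nat) : Int) * W = (v.2.2 + (k : Int) * W) + W := by
      push_cast; ring
    rw [hmap, hc, pv_foldl_max_add]
    have hz : (a + ((k + 1 : Nat) : Int) - 1 - (a + k)) = 0 := by push_cast; ring
    have he2 : a + ((k + 1 : Nat) : Int) - 1 = a + k := by push_cast; ring
    rw [hz, he2]
    simp [max_comm]

theorem pv_main (lane : String) (traffic : List Int) (W : Int) (X : Int)
    (h : 2 ≤ traffic.length) :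
    List.foldl (fun last i => (lane, i, max (PySem.List.pyGetD traffic i 0) (last.2.2 + W)))
      (lane, 1, X) (PySem.List.pyRange 2 (traffic.length : Int) 1)
    = (lane, (traffic.length : Int) - 1,
       List.foldl max (X + ((traffic.length : Int) - 2) * W)
         ((PySem.List.pyRange 2 (traffic.length : Int) 1).map
           (fun j => PySem.List.pyGetD traffic j 0 + ((traffic.length : Int) - 1 - j) * W))) := by
  have hk : (traffic.length : Int) = 2 + ((traffic.length - 2 : Nat) : Int) := by
    omega
  have hk2 : (((traffic.length - 2 : Nat) : Int)) = (traffic.length : Int) - 2 := by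
    omega
  rw [hk]
  rw [pv_core lane traffic W (traffic.length - 2) 2 (lane, 1, X) rfl (by norm_num)]
  rw [hk2]
  norm_num

theorem schedule_single_lane_spec : Claim_equal_schedule_single_lane := by
  intro lane traffic W_same W_diff prev _ hpre
  unfold Pre_schedule_single_lane at hpre
  unfold Spec_schedule_single_lane schedule_single_lane schedule_single_lane_alt
  dsimp only
  split_ifs with h1 h2
  · exact pv_main lane traffic W_same _ hpre
  · exact pv_main lane traffic W_same _ hpre
  · exact pv_main lane traffic W_same _ hpre
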